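-- pv_equiv track=rewrite | github.com/K-Miles/ConnectFour | connectfour.py | check_match_of_column
-- ===== SOURCE A (Python) =====
-- def check_match_of_column(column: list, chip_value: int):
--     ctr = 0
--     for item in column:
--         if item == chip_value:
--             ctr = ctr + 1
--             if ctr == 4:
--                 return True # point
--         else:
--             ctr = 0
--     return False
-- ===== SOURCE B (Python) =====
-- def check_match_of_column(column: list, chip_value: int):
--     # group the column into maximal runs of equal values, then test the runs
--     runs = []
--     for x in column:
--         if runs and runs[-1][0] == x:
--             runs[-1][1] += 1
--         else:
--             runs.append([x, 1])
--     return any(k == chip_value and n >= 4 for k, n in runs)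
-- ===== Notes on version B (the rewrite author's own statement) =====
-- stated objective: idiomatic
-- what changed: Replaces the incremental counter-and-reset loop with a group-into-runs decomposition: the column is collapsed into maximal runs of equal values, then any run with the chip value of length >= 4 yields True.
import Mathlib
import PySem

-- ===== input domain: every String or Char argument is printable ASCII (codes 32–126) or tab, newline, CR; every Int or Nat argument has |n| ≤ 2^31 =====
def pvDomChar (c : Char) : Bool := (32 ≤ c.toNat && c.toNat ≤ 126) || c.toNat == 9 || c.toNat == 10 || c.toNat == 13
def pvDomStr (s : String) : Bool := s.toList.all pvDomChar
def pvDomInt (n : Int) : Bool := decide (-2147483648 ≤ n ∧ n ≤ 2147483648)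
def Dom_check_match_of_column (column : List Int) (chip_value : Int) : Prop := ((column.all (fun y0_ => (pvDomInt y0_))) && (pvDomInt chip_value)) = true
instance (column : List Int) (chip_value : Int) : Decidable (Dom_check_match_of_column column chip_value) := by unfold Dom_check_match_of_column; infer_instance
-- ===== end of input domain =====

-- B groups the column into maximal runs of equal values and tests the runs, instead of A's counter-and-reset loop.


-- ===== PORT A =====
-- A's loop: counter ctr, incremented on a match (early-return at 4), reset to 0 on a mismatch.
def checkLoopA (xs : List Int) (chip_value : Int) (ctr : Int) : Bool :=
  match xs with
  | [] => false
  | item :: rest =>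
    if item == chip_value then
      if ctr + 1 == 4 then true else checkLoopA rest chip_value (ctr + 1)
    else
      checkLoopA rest chip_value 0

def check_match_of_column (column : List Int) (chip_value : Int) : Bool :=
  checkLoopA column chip_value 0

-- ===== PORT B =====
-- B's run grouping: collapse the column into maximal runs (value, length), carrying the current run.
def runsAux (cur : Int) (cnt : Nat) (xs : List Int) : List (Int × Nat) :=
  match xs with
  | [] => [(cur, cnt)]
  | x :: rest => if x == cur then runsAux cur (cnt + 1) rest else (cur, cnt) :: runsAux x 1 rest

def runsOf (column : List Int) : List (Int × Nat) :=
  match column with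
  | [] => []
  | x :: rest => runsAux x 1 rest

def check_match_of_column_alt (column : List Int) (chip_value : Int) : Bool :=
  (runsOf column).any (fun p => p.1 == chip_value && decide (4 ≤ p.2))

-- ===== PRECONDITION & SPEC =====
def Spec_check_match_of_column (column : List Int) (chip_value : Int) (out : Bool) : Prop := out = check_match_of_column_alt column chip_value
instance (column : List Int) (chip_value : Int) (out : Bool) : Decidable (Spec_check_match_of_column column chip_value out) := by unfold Spec_check_match_of_column; infer_instance

-- ===== CLAIM (what is proved, stated in full; the proofs are below) =====
def Claim_equal_check_match_of_column : Prop := ∀ (column : List Int) (chip_value : Int), Dom_check_match_of_column column chip_value → Spec_check_match_of_column column chip_value (check_match_of_column column chip_value)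

-- ===== LEMMAS AND PROOFS =====

theorem runsAux_any (chip : Int) (xs : List Int) : ∀ (cur : Int) (cnt : Nat),
    (runsAux cur cnt xs).any (fun p => p.1 == chip && decide (4 ≤ p.2)) =
      (if cur = chip then (if 4 ≤ cnt then true else checkLoopA xs chip (cnt : Int)) else checkLoopA xs chip 0) := by
  induction xs with
  | nil =>
    intro cur cnt
    simp only [runsAux, checkLoopA, List.any_cons, List.any_nil, Bool.or_false]
    split_ifs <;> simp_all
  | cons x rest ih =>
    intro cur cnt
    simp only [runsAux, checkLoopA, beq_iff_eq]
    by_cases hx : x = cur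
    · subst hx
      rw [if_pos rfl, ih]
      by_cases hc : x = chip
      · subst hc
        rw [if_pos rfl]
        push_cast
        split_ifs <;> first | rfl | omega
      · simp only [if_neg hc]
    · rw [if_neg hx, List.any_cons, ih]
      by_cases hc : cur = chip
      · have h1 : (cur == chip) = true := by simp [hc]
        rw [if_pos hc, h1, Bool.true_and]
        by_cases hxchip : x = chip
        · exact absurd (hxchip.trans hc.symm) hx
        · rw [if_neg hxchip, if_neg hxchip]
          split_ifs <;> simp_all
      · have h1 : (cur == chip) = false := by simp [hc]
        rw [if_neg hc, h1, Bool.false_and, Bool.false_or]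
        by_cases hxchip : x = chip
        · rw [if_pos hxchip, if_pos hxchip]
          rw [if_neg (by omega : ¬ (4:Nat) ≤ 1), if_neg (by norm_num : ¬ ((0:Int) + 1 = 4))]
          norm_num
        · rw [if_neg hxchip, if_neg hxchip]

-- ===== VERDICT (by name: the statement is the Claim_ definition above) =====
theorem check_match_of_column_spec : Claim_equal_check_match_of_column := by
  intro column chip _
  unfold Spec_check_match_of_column check_match_of_column check_match_of_column_alt runsOf
  cases column with
  | nil => simp [checkLoopA]
  | cons x rest =>
    rw [runsAux_any]
    simp only [checkLoopA, beq_iff_eq]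
    by_cases hx : x = chip
    · rw [if_pos hx, if_pos hx, if_neg (by omega : ¬ 4 ≤ 1)]
      norm_num
    · rw [if_neg hx, if_neg hx]
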